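-- pv_equiv track=rewrite | github.com/botir07/hana | core/waifu.py | soften
-- ===== SOURCE A (Python) =====
-- def soften(text: str) -> str:
--     replacements = {
--         "enabled": "on",
--         "completed": "done",
--         "executed": "done",
--         "processing": "on it",
--         "initialized": "ready",
--         "request": "ask",
--         "response": "reply",
--     }
--     out = text
--     for k, v in replacements.items():
--         out = out.replace(k, v)
--         out = out.replace(k.capitalize(), v.capitalize())
--     return out
-- ===== SOURCE B (Python) =====
-- def soften(text: str) -> str:
--     pairs = (
--         ("enabled", "on"),
--         ("completed", "done"),
--         ("executed", "done"),
--         ("processing", "on it"),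
--         ("initialized", "ready"),
--         ("request", "ask"),
--         ("response", "reply"),
--     )
--
--     def go(s: str, i: int) -> str:
--         if i == len(pairs):
--             return s
--         k, v = pairs[i]
--         s = v.join(s.split(k))
--         s = v.capitalize().join(s.split(k.capitalize()))
--         return go(s, i + 1)
--
--     return go(text, 0)
-- ===== Notes on version B (the rewrite author's own statement) =====
-- stated objective: alternative
-- what changed: Each replacement pass now splits the string into fragments around the key and joins them with the value (v.join(s.split(k))), driven by recursion over a tuple of pairs instead of a dict loop calling str.replace twice per entry.
import Mathlib
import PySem

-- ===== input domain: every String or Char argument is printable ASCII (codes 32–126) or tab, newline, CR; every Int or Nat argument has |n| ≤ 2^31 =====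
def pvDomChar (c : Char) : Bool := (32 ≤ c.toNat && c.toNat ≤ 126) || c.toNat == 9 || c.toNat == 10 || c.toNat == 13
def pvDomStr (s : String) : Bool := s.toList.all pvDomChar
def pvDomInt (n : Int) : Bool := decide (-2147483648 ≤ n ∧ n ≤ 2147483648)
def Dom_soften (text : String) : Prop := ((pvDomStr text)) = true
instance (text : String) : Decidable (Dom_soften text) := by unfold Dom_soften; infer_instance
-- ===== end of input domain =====

-- B replaces each str.replace pass by split-on-key / join-with-value over fragment lists,
-- recursing over the pair list instead of looping over a dict; alternative structure, same cost.

-- ===== PORT A =====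
-- s.capitalize(): first char uppercased, rest lowercased (exact on the ASCII domain)
def pyCapitalize (s : String) : String :=
  match s.toList with
  | [] => s
  | c :: t => String.ofList (PySem.Chars.upperChar c :: PySem.Chars.lower t)

def softenReplacements : PySem.Dict String String :=
  PySem.Dict.ofList [("enabled", "on"), ("completed", "done"), ("executed", "done"),
    ("processing", "on it"), ("initialized", "ready"), ("request", "ask"), ("response", "reply")]

def soften (text : String) : String :=
  softenReplacements.items.foldl
    (fun out kv =>
      let out1 := PySem.Str.replace out kv.1 kv.2
      PySem.Str.replace out1 (pyCapitalize kv.1) (pyCapitalize kv.2))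
    text

-- ===== PORT B =====
def softenPairs : List (String × String) :=
  [("enabled", "on"), ("completed", "done"), ("executed", "done"),
   ("processing", "on it"), ("initialized", "ready"), ("request", "ask"), ("response", "reply")]

-- v.join(s.split(k)) — split with a nonempty separator is exactly Chars.splitOn (split? = some ∘ splitOn)
def softenPass (s k v : String) : String :=
  String.ofList (PySem.Chars.join v.toList (PySem.Chars.splitOn s.toList k.toList))

def softenGo : String → List (String × String) → String
  | s, [] => s
  | s, (k, v) :: rest =>
      softenGo (softenPass (softenPass s k v) (pyCapitalize k) (pyCapitalize v)) rest

def soften_alt (text : String) : String := softenGo text softenPairs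

-- ===== PRECONDITION & SPEC =====
def Spec_soften (text : String) (out : String) : Prop := out = soften_alt text
instance (text : String) (out : String) : Decidable (Spec_soften text out) := by unfold Spec_soften; infer_instance

-- ===== CLAIM (what is proved, stated in full; the proofs are below) =====
def Claim_equal_soften : Prop := ∀ (text : String), Dom_soften text → Spec_soften text (soften text)

-- ===== LEMMAS AND PROOFS =====

-- sep.intercalate (A ++ [x]): the last piece is appended after a separator (unless A is empty)
theorem intercalate_snoc (sep x : List Char) (A : List (List Char)) :
    sep.intercalate (A ++ [x]) = sep.intercalate A ++ (if A = [] then [] else sep) ++ x := by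
  induction A with
  | nil => simp [List.intercalate]
  | cons a as ih =>
      cases as with
      | nil => simp [List.intercalate]
      | cons b bs =>
          have h1 : sep.intercalate (a :: b :: (bs ++ [x]))
              = a ++ sep ++ sep.intercalate (b :: (bs ++ [x])) := by simp [List.intercalate]
          have h2 : sep.intercalate (a :: b :: bs)
              = a ++ sep ++ sep.intercalate (b :: bs) := by simp [List.intercalate]
          simp only [List.cons_append] at *
          rw [h1, ih, h2]; simp

-- replace.go prepends its accumulator (reversed)
theorem replaceGo_acc (old new : List Char) (fuel : Nat) :
    ∀ (l acc : List Char),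
      PySem.Chars.replace.go old new fuel l acc = acc.reverse ++ PySem.Chars.replace.go old new fuel l [] := by
  induction fuel with
  | zero => intro l acc; simp [PySem.Chars.replace.go]
  | succ n ih =>
      intro l acc
      cases l with
      | nil => simp [PySem.Chars.replace.go]
      | cons c t =>
          simp only [PySem.Chars.replace.go]
          split
          · rw [ih _ (new.reverse ++ acc), ih _ (new.reverse ++ [])]
            simp
          · rw [ih t (c :: acc), ih t [c]]
            simp

-- joining the pieces produced by splitOn.go reconstructs replace.go's output
theorem join_splitOnGo (old new : List Char) (fuel : Nat) :
    ∀ (l cur : List Char) (racc : List (List Char)),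
      PySem.Chars.join new (PySem.Chars.splitOn.go old fuel l cur racc) =
        new.intercalate racc.reverse ++ (if racc = [] then [] else new) ++
          PySem.Chars.replace.go old new fuel l cur := by
  induction fuel with
  | zero =>
      intro l cur racc
      simp only [PySem.Chars.splitOn.go, PySem.Chars.replace.go, PySem.Chars.join]
      rw [List.reverse_cons, intercalate_snoc]
      cases racc <;> simp
  | succ n ih =>
      intro l cur racc
      cases l with
      | nil =>
          simp only [PySem.Chars.splitOn.go, PySem.Chars.replace.go, PySem.Chars.join]
          rw [List.reverse_cons, intercalate_snoc]
          cases racc <;> simp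
      | cons c t =>
          simp only [PySem.Chars.splitOn.go, PySem.Chars.replace.go]
          split
          · rw [ih _ [] (cur.reverse :: racc),
              replaceGo_acc old new n _ (new.reverse ++ cur)]
            rw [List.reverse_cons, intercalate_snoc]
            cases racc <;> simp
          · exact ih t (c :: cur) racc

-- v.join(s.split(k)) = s.replace(k, v) for a nonempty separator (at the List Char level)
theorem join_splitOn_eq_replace (s old new : List Char) (h : old ≠ []) :
    PySem.Chars.join new (PySem.Chars.splitOn s old) = PySem.Chars.replace s old new := by
  have hfuel : ∀ (fuel fuel' : Nat) (l acc : List Char), l.length ≤ fuel → l.length ≤ fuel' →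
      PySem.Chars.replace.go old new fuel l acc = PySem.Chars.replace.go old new fuel' l acc := by
    intro fuel
    induction fuel with
    | zero =>
        intro fuel' l acc h1 _
        have : l = [] := List.eq_nil_of_length_eq_zero (Nat.le_zero.mp h1)
        subst this
        cases fuel' <;> simp [PySem.Chars.replace.go]
    | succ n ih =>
        intro fuel' l acc h1 h2
        cases l with
        | nil => cases fuel' <;> simp [PySem.Chars.replace.go]
        | cons c t =>
            cases fuel' with
            | zero => simp at h2
            | succ m =>
                simp only [PySem.Chars.replace.go]
                split
                · rename_i hp
                  apply ih
                  · simp only [List.length_drop]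
                    have := List.IsPrefix.length_le (List.isPrefixOf_iff_prefix.mp hp)
                    have hol : 1 ≤ old.length := by
                      cases old with
                      | nil => exact absurd rfl h
                      | cons a b => simp
                    simp at h1 ⊢; omega
                  · simp only [List.length_drop]
                    have hol : 1 ≤ old.length := by
                      cases old with
                      | nil => exact absurd rfl h
                      | cons a b => simp
                    simp at h2 ⊢; omega
                · apply ih <;> (simp at h1 h2 ⊢; omega)
  unfold PySem.Chars.splitOn PySem.Chars.replace
  rw [if_neg (by simpa using h)]
  rw [join_splitOnGo old new (s.length + 1) s [] []]
  simp [List.intercalate]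
  exact hfuel (s.length + 1) s.length s [] (by omega) (le_refl _)

-- the String-level pass of B equals Python's str.replace for a nonempty key
theorem softenPass_eq_replace (s k v : String) (h : k.toList ≠ []) :
    softenPass s k v = PySem.Str.replace s k v := by
  unfold softenPass PySem.Str.replace
  rw [join_splitOn_eq_replace _ _ _ h]

-- ===== VERDICT (by name: the statement is the Claim_ definition above) =====
theorem soften_spec : Claim_equal_soften := by
  intro text _
  show soften text = soften_alt text
  have hitems : softenReplacements.items = softenPairs := by decide
  unfold soften soften_alt
  rw [hitems]
  unfold softenPairs
  simp only [List.foldl, softenGo]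
  rw [softenPass_eq_replace, softenPass_eq_replace, softenPass_eq_replace,
      softenPass_eq_replace, softenPass_eq_replace, softenPass_eq_replace,
      softenPass_eq_replace, softenPass_eq_replace, softenPass_eq_replace,
      softenPass_eq_replace, softenPass_eq_replace, softenPass_eq_replace,
      softenPass_eq_replace, softenPass_eq_replace]
  all_goals decide
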